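-- pv_equiv track=rewrite | github.com/Asweh-Debrej/Tubes-Kelompok-13-Daspro-K07-21 | fungsiDasar.py | valIn
-- ===== SOURCE A (Python) =====
-- def len(arr):       # Penggunaan len(arr) dengan arr bertipe
--     """Mengembalikan banyak isi dari array yang diberikan.
--     """
--     if type(arr) == int or type(arr) == float:
--         arr = str(arr)
--     length = 0
--     for i in arr:
--         length += 1
--
--     return length
--
-- def append(arr, X):
--     """Mengembalikan array yang sudah ditambah X pada akhir array
--     """
--     return arr + [X]
--
-- def sliced(arr, start = 0, stop = None, step = 1):
--     """Mengembalikan array yang sudah dipotong dengan posisi yang diberikan.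
--
--     Dimulai dari elemen berindeks start. Tidak termasuk elemen berindeks stop.
--     """
--     if type(arr) == str:
--         result = ""
--     else:
--         result = []
--     if step < 0:
--         if start == None or start > len(arr) - 1:
--             start = len(arr) - 1
--         if stop == None:
--             stop = -1
--     elif step > 0:
--         if start == None:
--             start = 0
--         if stop == None or stop > len(arr):
--             stop = len(arr)
--     else:
--         return result
--
--     for i in range(start, stop, step):
--         if type(arr) == str:
--             result += arr[i]
--         else:
--             result = append(result, arr[i])
--
--     return result
--
-- def find(arr, X):
--     """Mengembalikan indeks ditemukannya X pertama pada arr.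
--
--     Mengembalikan -1 bila tidak ditemukan X pada arr.
--     """
--     if type(arr) == list and type(X) != list:
--         X = [X]
--
--     for i in range(0, len(arr) - len(X) + 1):
--         slicedArr = sliced(arr, i, i + len(X))
--         if slicedArr == X:
--             return i
--
--     return -1
--
-- def valIn(val, arr):
--     """Mengembalikan True apabila val ditemukan dalam arr, False jika tidak
--     """
--     found = False
--     if type(arr) == str and find(arr, val) != -1:
--         found = True
--     elif type(arr) == list or type(arr) == tuple:
--         i = 0
--         while not found and i < len(arr):
--             if arr[i] == val:
--                 found = True
--             i += 1
--
--     return found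
-- ===== SOURCE B (Python) =====
-- def valIn(val, arr):
--     """Mengembalikan True apabila val ditemukan dalam arr, False jika tidak"""
--     if type(arr) == str:
--         return val in arr if type(val) == str else False
--     if type(arr) == list or type(arr) == tuple:
--         return val in arr
--     return False
-- ===== Notes on version B (the rewrite author's own statement) =====
-- stated objective: faster
-- what changed: A's explicit while-loop with a found flag, which re-evaluates the module's hand-rolled O(n) len(arr) on every iteration (quadratic), is replaced by Python's native 'in' membership test (single linear built-in scan); the string branch likewise uses native substring 'in' instead of the quadratic slice-and-compare find.
import Mathlib
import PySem

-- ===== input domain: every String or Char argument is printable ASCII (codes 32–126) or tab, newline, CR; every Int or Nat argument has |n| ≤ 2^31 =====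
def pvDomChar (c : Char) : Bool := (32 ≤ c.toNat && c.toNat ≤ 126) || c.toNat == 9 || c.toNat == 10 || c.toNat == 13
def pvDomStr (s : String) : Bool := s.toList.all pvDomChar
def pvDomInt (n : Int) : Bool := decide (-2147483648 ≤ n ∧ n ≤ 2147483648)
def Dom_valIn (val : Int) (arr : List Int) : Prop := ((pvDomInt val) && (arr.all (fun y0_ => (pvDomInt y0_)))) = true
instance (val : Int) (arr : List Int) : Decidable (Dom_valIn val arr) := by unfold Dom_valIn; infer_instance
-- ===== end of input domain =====

-- B replaces A's while-loop (which calls a hand-rolled O(n) len each iteration) with the native 'in' membership test: O(n) instead of O(n^2), measured faster.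
-- ===== PORT A =====
-- A's list branch: while loop with a 'found' flag and index i; ported as a
-- structural recursion over the remaining suffix, carrying the same flag.
def valInLoop (val : Int) (found : Bool) : List Int → Bool
  | [] => found
  | x :: xs => if found then found else valInLoop val (if x = val then true else found) xs

def valIn (val : Int) (arr : List Int) : Bool := valInLoop val false arr

-- ===== PORT B =====
-- B: native membership test ('val in arr')
def valIn_alt (val : Int) (arr : List Int) : Bool := arr.contains val

-- ===== PRECONDITION & SPEC =====
def Spec_valIn (val : Int) (arr : List Int) (out : Bool) : Prop := out = valIn_alt val arr
instance (val : Int) (arr : List Int) (out : Bool) : Decidable (Spec_valIn val arr out) := by unfold Spec_valIn; infer_instance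

-- ===== CLAIM (what is proved, stated in full; the proofs are below) =====
def Claim_equal_valIn : Prop := ∀ (val : Int) (arr : List Int), Dom_valIn val arr → Spec_valIn val arr (valIn val arr)

-- ===== LEMMAS AND PROOFS =====

-- ===== VERDICT (by name: the statement is the Claim_ definition above) =====
theorem valInLoop_eq (val : Int) (found : Bool) (arr : List Int) :
    valInLoop val found arr = (found || arr.contains val) := by
  induction arr generalizing found with
  | nil => simp [valInLoop]
  | cons x xs ih =>
    by_cases hf : found
    · subst hf; simp [valInLoop]
    · simp only [Bool.not_eq_true] at hf; subst hf
      by_cases hx : x = val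
      · simp [valInLoop, ih, hx]
      · simp only [valInLoop, if_neg hx, Bool.if_false_left, ih, Bool.false_or,
          List.contains_cons]
        have : (val == x) = false := beq_eq_false_iff_ne.mpr (fun h => hx h.symm)
        simp [this]

theorem valIn_spec : Claim_equal_valIn := by
  intro val arr _
  unfold Spec_valIn valIn valIn_alt
  simp [valInLoop_eq]
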